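-- pv_equiv track=rewrite | github.com/AliMuhammadAsad/Kattis-Solutions | src/colorland.py | mind
-- ===== SOURCE A (Python) =====
-- def mind(n, colors):
--     start = colors[0]
--     target = colors[-1]
--     q = [(0, 0)]
--     visited = {0} #set
--     while q:
--         curr, drawsYet = q.pop(0)
--         if curr == n:
--             return drawsYet
--         toFind = colors[curr + 1]
--         if toFind == target:
--             return drawsYet + 1
--         for i in range(len(colors)):
--             if colors[i] == toFind and i not in visited:
--                 visited.add(i)
--                 q.append((i, drawsYet + 1))
--     return -1
-- ===== SOURCE B (Python) =====
-- def mind(n, colors):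
--     # Level-synchronous BFS over COLORS instead of positions: once a color has been
--     # expanded every square of that color is visited, so a set of expanded colors
--     # replaces A's per-index visited set, and each color's bucket is emitted once.
--     target = colors[-1]
--     pos = {}
--     for i, c in enumerate(colors):
--         pos.setdefault(c, []).append(i)
--     expanded = set()
--     frontier = [0]
--     d = 0
--     while frontier:
--         nxt = []
--         for p in frontier:
--             if p == n:
--                 return d
--             need = colors[p + 1]
--             if need == target:
--                 return d + 1
--             if need not in expanded:
--                 expanded.add(need)
--                 nxt.extend(i for i in pos.get(need, []) if i != 0)
--         frontier = nxt
--         d += 1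
--     return -1
-- ===== Notes on version B (the rewrite author's own statement) =====
-- stated objective: faster
-- what changed: B replaces A's per-position BFS with a per-index visited set by a level-synchronous BFS over COLORS: a color->indices dict built once and a set of already-expanded colors, so each color's whole bucket is emitted exactly once and A's inner scan of all squares (and the visited-index set) disappears.
import Mathlib
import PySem

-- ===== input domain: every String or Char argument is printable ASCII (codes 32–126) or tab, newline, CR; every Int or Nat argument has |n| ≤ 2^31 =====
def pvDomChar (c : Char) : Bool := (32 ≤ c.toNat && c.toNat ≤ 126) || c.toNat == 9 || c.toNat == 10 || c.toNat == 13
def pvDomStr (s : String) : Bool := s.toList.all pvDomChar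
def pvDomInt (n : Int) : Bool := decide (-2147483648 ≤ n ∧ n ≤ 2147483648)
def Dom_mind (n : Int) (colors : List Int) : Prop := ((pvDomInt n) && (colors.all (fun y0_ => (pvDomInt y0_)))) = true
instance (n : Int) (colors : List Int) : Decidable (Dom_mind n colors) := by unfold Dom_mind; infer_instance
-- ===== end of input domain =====

-- B replaces A's per-position BFS (per-index visited set, inner scan of all squares)
-- by a level-synchronous BFS over colors: a color→indices dict built once plus a set of
-- expanded colors, each bucket emitted once — measured asymptotically faster.

-- ===== PORT A =====
-- BFS loop of A: queue of (index, draws) pairs, visited set; fuel only makes the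
-- recursion structural (it is never exhausted on inputs satisfying Pre_mind).
def mindLoopA (n : Int) (colors : List Int) (target : Int) :
    Nat → List (Int × Int) → PySem.Set Int → Int
  | 0, _, _ => -1
  | fuel+1, q, visited =>
    match q with
    | [] => -1
    | (curr, drawsYet) :: qt =>
      if curr = n then drawsYet
      else
        match PySem.List.pyGet? colors (curr + 1) with
        | none => -1   -- Python raises IndexError here; excluded by Pre_mind
        | some toFind =>
          if toFind = target then drawsYet + 1
          else
            let st := (PySem.List.pyRange 0 (colors.length : Int) 1).foldl
              (fun (st : List (Int × Int) × PySem.Set Int) i =>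
                if PySem.List.pyGetD colors i 0 == toFind && !(PySem.Set.contains st.2 i)
                then (st.1 ++ [(i, drawsYet + 1)], PySem.Set.add st.2 i)
                else st) (qt, visited)
            mindLoopA n colors target fuel st.1 st.2

def mind (n : Int) (colors : List Int) : Int :=
  match PySem.List.pyGet? colors 0, PySem.List.pyGet? colors (-1) with
  | some _, some target =>
      mindLoopA n colors target (colors.length + 2) [(0, 0)] (PySem.Set.ofList [0])
  | _, _ => -1   -- colors[0] / colors[-1] raise on []; excluded by Pre_mind

-- ===== PORT B =====
-- pos.setdefault(c, []).append(i) over enumerate(colors)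
def mindPos (colors : List Int) : PySem.Dict Int (List Int) :=
  (PySem.List.enumerate colors 0).foldl
    (fun d p => d.modify p.2 [] (· ++ [p.1])) PySem.Dict.empty

-- the inner 'for p in frontier' of one level: early return (.inl) or (nxt, expanded)
def mindScan (n : Int) (colors : List Int) (target : Int)
    (pos : PySem.Dict Int (List Int)) (d : Int) :
    List Int → PySem.Set Int → List Int → Sum Int (List Int × PySem.Set Int)
  | [], exp, acc => .inr (acc, exp)
  | p :: ps, exp, acc =>
    if p = n then .inl d
    else
      match PySem.List.pyGet? colors (p + 1) with
      | none => .inl (-1)   -- Python raises IndexError here; excluded by Pre_mind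
      | some need =>
        if need = target then .inl (d + 1)
        else if !(PySem.Set.contains exp need) then
          mindScan n colors target pos d ps (PySem.Set.add exp need)
            (acc ++ (pos.getD need []).filter (fun i => i != 0))
        else mindScan n colors target pos d ps exp acc

-- the outer 'while frontier' level loop; fuel only makes it structural
def mindLoopB (n : Int) (colors : List Int) (target : Int)
    (pos : PySem.Dict Int (List Int)) :
    Nat → List Int → PySem.Set Int → Int → Int
  | 0, _, _, _ => -1
  | fuel+1, frontier, exp, d =>
    match frontier with
    | [] => -1
    | _ :: _ =>
      match mindScan n colors target pos d frontier exp [] with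
      | .inl r => r
      | .inr (nxt, exp') => mindLoopB n colors target pos fuel nxt exp' (d + 1)

def mind_alt (n : Int) (colors : List Int) : Int :=
  match PySem.List.pyGet? colors (-1) with
  | none => -1   -- colors[-1] raises on []; excluded by Pre_mind
  | some target =>
      mindLoopB n colors target (mindPos colors) (colors.length + 2) [0] PySem.Set.empty 0

-- ===== PRECONDITION & SPEC =====
-- Pre_ excludes exactly the inputs where the Pythons raise IndexError: empty colors
-- (colors[0]/colors[-1]) and a one-square board with n ≠ 0 (colors[0+1]).
def Pre_mind (n : Int) (colors : List Int) : Prop :=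
  colors ≠ [] ∧ (colors.length = 1 → n = 0)
instance (n : Int) (colors : List Int) : Decidable (Pre_mind n colors) := by
  unfold Pre_mind; infer_instance

def pvWitness_mind : Int × List Int := (2, [1, 2, 1])

def Spec_mind (n : Int) (colors : List Int) (out : Int) : Prop := out = mind_alt n colors
instance (n : Int) (colors : List Int) (out : Int) : Decidable (Spec_mind n colors out) := by
  unfold Spec_mind; infer_instance

-- ===== CLAIM (what is proved, stated in full; the proofs are below) =====
def Claim_equal_mind : Prop := ∀ (n : Int) (colors : List Int), Dom_mind n colors →
  Pre_mind n colors → Spec_mind n colors (mind n colors)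

-- ===== LEMMAS AND PROOFS =====

-- A's inner enqueue step (enqueue i at level draws+1 if unvisited)
def mindStep (draws : Int) (st : List (Int × Int) × PySem.Set Int) (i : Int) :
    List (Int × Int) × PySem.Set Int :=
  if !(PySem.Set.contains st.2 i)
  then (st.1 ++ [(i, draws + 1)], PySem.Set.add st.2 i)
  else st

-- what A's visited set contains when the expanded-color set is exp
def mindVis (colors : List Int) (exp : PySem.Set Int) (i : Int) : Bool :=
  (i == 0) || (decide (0 ≤ i) && decide (i < (colors.length : Int))
    && PySem.Set.contains exp (PySem.List.pyGetD colors i 0))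

-- potential: number of nonzero positions whose color is not yet expanded
def mindU (colors : List Int) (exp : PySem.Set Int) : Nat :=
  ((PySem.List.pyRange 0 (colors.length : Int) 1).filter
    (fun i => (i != 0) && !(PySem.Set.contains exp (PySem.List.pyGetD colors i 0)))).length

theorem intBeqDecide (a b : Int) : (a == b) = decide (a = b) := by
  by_cases h : a = b <;> simp [h]

theorem mindContainsAdd (s : PySem.Set Int) (x y : Int) :
    PySem.Set.contains (PySem.Set.add s x) y = (PySem.Set.contains s y || y == x) := by
  rw [intBeqDecide]
  by_cases hm : x ∈ s
  · rw [PySem.Set.add_of_mem hm]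
    by_cases hy : y = x
    · subst hy; simp [hm]
    · simp [hy]
  · rw [PySem.Set.add_of_not_mem hm]
    by_cases hy : y = x
    · subst hy; simp
    · simp [hy]

-- A's inner scan over range(len(colors)) is mindStep folded over the indices of color toFind
theorem mind_innerA_eq (colors : List Int) (toFind draws : Int)
    (init : List (Int × Int) × PySem.Set Int) :
    (PySem.List.pyRange 0 (colors.length : Int) 1).foldl
      (fun (st : List (Int × Int) × PySem.Set Int) i =>
        if PySem.List.pyGetD colors i 0 == toFind && !(PySem.Set.contains st.2 i)
        then (st.1 ++ [(i, draws + 1)], PySem.Set.add st.2 i)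
        else st) init =
    ((PySem.List.pyRange 0 (colors.length : Int) 1).filter
      (fun i => PySem.List.pyGetD colors i 0 == toFind)).foldl (mindStep draws) init := by
  rw [← PySem.List.foldl_if_eq_foldl_filter]
  apply PySem.List.foldl_congr_mem
  intro st i _
  by_cases h : (PySem.List.pyGetD colors i 0 == toFind) = true <;>
    simp [mindStep, h]

-- B's bucket pos[need] is exactly that filtered index list
theorem mind_bucket_eq (colors : List Int) (c : Int) :
    (mindPos colors).getD c [] =
    (PySem.List.pyRange 0 (colors.length : Int) 1).filter
      (fun i => PySem.List.pyGetD colors i 0 == c) := by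
  unfold mindPos
  rw [show (PySem.List.enumerate colors 0).foldl
        (fun d p => d.modify p.2 [] (· ++ [p.1])) PySem.Dict.empty
      = ((PySem.List.enumerate colors 0).map Prod.swap).foldl
        (fun d p => d.modify p.1 [] (· ++ [p.2])) PySem.Dict.empty by
    rw [List.foldl_map]; rfl]
  rw [PySem.Dict.getD_foldl_modify_append]
  rw [PySem.List.enumerate_eq_map_pyRange colors 0]
  simp [List.map_map, List.filter_map, Function.comp_def]

theorem mind_range_nodup (colors : List Int) :
    (PySem.List.pyRange 0 (colors.length : Int) 1).Nodup := by
  rw [PySem.List.pyRange_zero_natCast]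
  exact (List.nodup_range).map (fun a b h => by exact_mod_cast h)

-- mindStep folded over a duplicate-free index list: appends the unvisited ones, adds them all
theorem mind_fold_step (draws : Int) :
    ∀ (l : List Int) (q : List (Int × Int)) (v : PySem.Set Int), l.Nodup →
      (l.foldl (mindStep draws) (q, v)).1
        = q ++ (l.filter (fun i => !(PySem.Set.contains v i))).map (fun i => (i, draws + 1))
      ∧ ∀ j, PySem.Set.contains (l.foldl (mindStep draws) (q, v)).2 j
        = (PySem.Set.contains v j || l.contains j) := by
  intro l
  induction l with
  | nil => intro q v _; simp
  | cons i t ih =>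
    intro q v hnd
    obtain ⟨hit, hndt⟩ := List.nodup_cons.mp hnd
    by_cases hv : i ∈ v
    · have hstep : mindStep draws (q, v) i = (q, v) := by
        simp [mindStep, hv]
      obtain ⟨h1, h2⟩ := ih q v hndt
      constructor
      · rw [List.foldl_cons, hstep, h1]
        have hf : List.filter (fun i => !(PySem.Set.contains v i)) (i :: t)
            = List.filter (fun i => !(PySem.Set.contains v i)) t := by
          simp [hv]
        rw [hf]
      · intro j
        rw [List.foldl_cons, hstep, h2 j, List.contains_cons, intBeqDecide]
        by_cases hji : j = i
        · subst hji; simp [hv]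
        · simp [hji]
    · have hstep : mindStep draws (q, v) i = (q ++ [(i, draws + 1)], PySem.Set.add v i) := by
        simp [mindStep, hv]
      obtain ⟨h1, h2⟩ := ih (q ++ [(i, draws + 1)]) (PySem.Set.add v i) hndt
      constructor
      · rw [List.foldl_cons, hstep, h1]
        have hf : List.filter (fun j => !(PySem.Set.contains (PySem.Set.add v i) j)) t
            = List.filter (fun j => !(PySem.Set.contains v j)) t := by
          apply List.filter_congr
          intro j hj
          rw [mindContainsAdd, intBeqDecide]
          have : ¬ (j = i) := fun h => hit (h ▸ hj)
          simp [this]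
        rw [hf]
        have hg : List.filter (fun j => !(PySem.Set.contains v j)) (i :: t)
            = i :: List.filter (fun j => !(PySem.Set.contains v j)) t := by
          simp [hv]
        rw [hg]
        simp
      · intro j
        rw [List.foldl_cons, hstep, h2 j, mindContainsAdd, intBeqDecide,
          List.contains_cons, intBeqDecide]
        by_cases hji : j = i
        · subst hji; simp
        · simp [hji]

-- splitting a filter length along a second test
theorem mind_filter_split (l : List Int) (p q : Int → Bool) :
    (l.filter p).length
      = (l.filter (fun x => p x && q x)).length + (l.filter (fun x => p x && !q x)).length := by
  induction l with
  | nil => simp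
  | cons x t ih =>
    by_cases hp : p x = true
    · by_cases hq : q x = true <;> simp [hp, hq, ih] <;> omega
    · simp [hp, ih]

-- the potential drops by exactly the bucket (minus index 0) when a new color is expanded
theorem mind_U_expand (colors : List Int) (exp : PySem.Set Int) (need : Int)
    (hne : PySem.Set.contains exp need = false) :
    mindU colors exp
      = mindU colors (PySem.Set.add exp need)
        + (((PySem.List.pyRange 0 (colors.length : Int) 1).filter
            (fun i => PySem.List.pyGetD colors i 0 == need)).filter (fun i => i != 0)).length := by
  unfold mindU
  rw [List.filter_filter]
  rw [mind_filter_split (PySem.List.pyRange 0 (colors.length : Int) 1)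
    (fun i => (i != 0) && !(PySem.Set.contains exp (PySem.List.pyGetD colors i 0)))
    (fun i => PySem.List.pyGetD colors i 0 == need)]
  have hA : ∀ i : Int,
      (((i != 0) && !(PySem.Set.contains exp (PySem.List.pyGetD colors i 0)))
        && !(PySem.List.pyGetD colors i 0 == need))
      = ((i != 0) && !(PySem.Set.contains (PySem.Set.add exp need) (PySem.List.pyGetD colors i 0))) := by
    intro i
    rw [mindContainsAdd]
    by_cases hc : (PySem.List.pyGetD colors i 0 == need) = true
    · have hni : PySem.Set.contains exp (PySem.List.pyGetD colors i 0) = false := by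
        rw [beq_iff_eq.mp hc]; exact hne
      simp [hc]
    · simp [hc]
  have hB : ∀ i : Int,
      (((i != 0) && !(PySem.Set.contains exp (PySem.List.pyGetD colors i 0)))
        && (PySem.List.pyGetD colors i 0 == need))
      = ((i != 0) && (PySem.List.pyGetD colors i 0 == need)) := by
    intro i
    by_cases hc : (PySem.List.pyGetD colors i 0 == need) = true
    · have hni : PySem.Set.contains exp (PySem.List.pyGetD colors i 0) = false := by
        rw [beq_iff_eq.mp hc]; exact hne
      simp [hc]
      intro _
      simpa using hni
    · simp [hc]
  simp only [funext hA, funext hB]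
  omega

-- one level of B's scan simulates frontier.length pops of A's loop
theorem mind_scan_sim (n : Int) (colors : List Int) (target d : Int) :
    ∀ (frontier : List Int) (exp visited : PySem.Set Int) (acc : List Int) (fuelA : Nat),
      (∀ i, PySem.Set.contains visited i = mindVis colors exp i) →
      ((∃ r, mindScan n colors target (mindPos colors) d frontier exp acc = .inl r ∧
          mindLoopA n colors target (frontier.length + fuelA)
            (frontier.map (fun p => (p, d)) ++ acc.map (fun p => (p, d + 1))) visited = r)
       ∨ (∃ nxt exp' visited',
          mindScan n colors target (mindPos colors) d frontier exp acc = .inr (nxt, exp') ∧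
          (∀ i, PySem.Set.contains visited' i = mindVis colors exp' i) ∧
          mindLoopA n colors target (frontier.length + fuelA)
            (frontier.map (fun p => (p, d)) ++ acc.map (fun p => (p, d + 1))) visited
            = mindLoopA n colors target fuelA (nxt.map (fun p => (p, d + 1))) visited' ∧
          nxt.length + mindU colors exp' ≤ acc.length + mindU colors exp)) := by
  intro frontier
  induction frontier with
  | nil =>
    intro exp visited acc fuelA hrel
    right
    exact ⟨acc, exp, visited, rfl, hrel, by simp, le_refl _⟩
  | cons p ps ih =>
    intro exp visited acc fuelA hrel
    by_cases hpn : p = n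
    · left
      refine ⟨d, by simp [mindScan, hpn], ?_⟩
      rw [show (p :: ps).length + fuelA = (ps.length + fuelA) + 1 by simp [Nat.add_right_comm]]
      simp [mindLoopA, hpn]
    · cases hget : PySem.List.pyGet? colors (p + 1) with
      | none =>
        left
        refine ⟨-1, by simp [mindScan, hpn, hget], ?_⟩
        rw [show (p :: ps).length + fuelA = (ps.length + fuelA) + 1 by simp [Nat.add_right_comm]]
        simp [mindLoopA, hpn, hget]
      | some need =>
        by_cases htg : need = target
        · left
          refine ⟨d + 1, by simp [mindScan, hpn, hget, htg], ?_⟩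
          rw [show (p :: ps).length + fuelA = (ps.length + fuelA) + 1 by simp [Nat.add_right_comm]]
          simp [mindLoopA, hpn, hget, htg]
        · -- expansion step of A
          have hloop : mindLoopA n colors target (ps.length + fuelA + 1)
              ((p, d) :: (ps.map (fun p => (p, d)) ++ acc.map (fun p => (p, d + 1)))) visited
              = mindLoopA n colors target (ps.length + fuelA)
                  (((PySem.List.pyRange 0 (colors.length : Int) 1).filter
                    (fun i => PySem.List.pyGetD colors i 0 == need)).foldl (mindStep d)
                    (ps.map (fun p => (p, d)) ++ acc.map (fun p => (p, d + 1)), visited)).1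
                  (((PySem.List.pyRange 0 (colors.length : Int) 1).filter
                    (fun i => PySem.List.pyGetD colors i 0 == need)).foldl (mindStep d)
                    (ps.map (fun p => (p, d)) ++ acc.map (fun p => (p, d + 1)), visited)).2 := by
            simp only [mindLoopA, hpn, hget, htg]
            rw [mind_innerA_eq]
            simp
          set bucket := (PySem.List.pyRange 0 (colors.length : Int) 1).filter
            (fun i => PySem.List.pyGetD colors i 0 == need) with hbdef
          have hbnodup : bucket.Nodup := (mind_range_nodup colors).filter _
          obtain ⟨hfold1, hfold2⟩ := mind_fold_step d bucket
            (ps.map (fun p => (p, d)) ++ acc.map (fun p => (p, d + 1))) visited hbnodup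
          have hbmem : ∀ i ∈ bucket, (0 ≤ i ∧ i < (colors.length : Int))
              ∧ PySem.List.pyGetD colors i 0 = need := by
            intro i hi
            rw [hbdef, List.mem_filter] at hi
            exact ⟨(PySem.List.mem_pyRange_one).mp hi.1, beq_iff_eq.mp hi.2⟩
          by_cases hexp : PySem.Set.contains exp need = true
          · -- color already expanded: nothing new enqueued, visited's members unchanged
            have hexpm : need ∈ exp := by simpa using hexp
            have hfilt : bucket.filter (fun i => !(PySem.Set.contains visited i)) = [] := by
              apply List.filter_eq_nil_iff.mpr
              intro i hi
              obtain ⟨⟨h0, h1⟩, hc⟩ := hbmem i hi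
              have : PySem.Set.contains visited i = true := by
                rw [hrel i, mindVis, hc]
                simp [h0, h1, hexpm]
              simpa using this
            have hrel' : ∀ j, PySem.Set.contains
                (bucket.foldl (mindStep d)
                  (ps.map (fun p => (p, d)) ++ acc.map (fun p => (p, d + 1)), visited)).2 j
                = mindVis colors exp j := by
              intro j
              rw [hfold2 j, ← hrel j]
              by_cases hj : bucket.contains j = true
              · have hjm : j ∈ bucket := by
                  simpa using hj
                obtain ⟨⟨h0, h1⟩, hc⟩ := hbmem j hjm
                have : PySem.Set.contains visited j = true := by
                  rw [hrel j, mindVis, hc]; simp [h0, h1, hexpm]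
                rw [this]
                simp
              · have hbf : bucket.contains j = false := by simpa using hj
                rw [hbf]
                simp
            obtain h := ih exp _ acc fuelA hrel'
            rcases h with ⟨r, hscan, heq⟩ | ⟨nxt, exp', visited', hscan, hrel'', heq, hle⟩
            · left
              refine ⟨r, ?_, ?_⟩
              · simp only [mindScan, if_neg hpn, hget, if_neg htg, hexp]
                simpa using hscan
              · show mindLoopA n colors target ((p :: ps).length + fuelA) _ _ = r
                simp only [List.length_cons, List.map_cons, List.cons_append]
                rw [show ps.length + 1 + fuelA = ps.length + fuelA + 1 by omega, hloop,
                  hfold1, hfilt]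
                simpa using heq
            · right
              refine ⟨nxt, exp', visited', ?_, hrel'', ?_, hle⟩
              · simp only [mindScan, if_neg hpn, hget, if_neg htg, hexp]
                simpa using hscan
              · simp only [List.length_cons, List.map_cons, List.cons_append]
                rw [show ps.length + 1 + fuelA = ps.length + fuelA + 1 by omega, hloop,
                  hfold1, hfilt]
                simpa using heq
          · -- new color: the whole bucket minus index 0 is enqueued
            have hexp' : PySem.Set.contains exp need = false := by
              simpa using hexp
            have hexpm' : need ∉ exp := by simpa using hexp'
            have hfilt : bucket.filter (fun i => !(PySem.Set.contains visited i))
                = bucket.filter (fun i => i != 0) := by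
              apply List.filter_congr
              intro i hi
              obtain ⟨⟨h0, h1⟩, hc⟩ := hbmem i hi
              rw [hrel i, mindVis, hc]
              simp [h0, h1, hexpm', bne]
            have hrel' : ∀ j, PySem.Set.contains
                (bucket.foldl (mindStep d)
                  (ps.map (fun p => (p, d)) ++ acc.map (fun p => (p, d + 1)), visited)).2 j
                = mindVis colors (PySem.Set.add exp need) j := by
              intro j
              rw [hfold2 j, hrel j, mindVis, mindVis, mindContainsAdd]
              by_cases hj : bucket.contains j = true
              · have hjm : j ∈ bucket := by simpa using hj
                obtain ⟨⟨h0, h1⟩, hc⟩ := hbmem j hjm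
                rw [hc]
                simp [h0, h1]
                exact Or.inr hjm
              · have hjm : j ∉ bucket := by simpa using hj
                have hbf : bucket.contains j = false := by simpa using hj
                have : (PySem.List.pyGetD colors j 0 == need) = false
                    ∨ ¬ (0 ≤ j ∧ j < (colors.length : Int)) := by
                  by_cases hr : (0 ≤ j ∧ j < (colors.length : Int))
                  · left
                    by_contra hcc
                    have hcc' : (PySem.List.pyGetD colors j 0 == need) = true := by
                      simpa using hcc
                    exact hjm (by
                      rw [hbdef, List.mem_filter]
                      exact ⟨(PySem.List.mem_pyRange_one).mpr hr, hcc'⟩)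
                  · right; exact hr
                rcases this with hcf | hrf
                · simp [hjm, hcf]
                · have h0f : (decide (0 ≤ j) && decide (j < (colors.length : Int))) = false := by
                    rcases (not_and_or.mp hrf) with h | h <;> simp [h]
                  simp [hjm, h0f]
            obtain h := ih (PySem.Set.add exp need) _
              (acc ++ ((mindPos colors).getD need []).filter (fun i => i != 0)) fuelA hrel'
            have haccmap : (acc ++ ((mindPos colors).getD need []).filter (fun i => i != 0)).map
                (fun p => (p, d + 1))
                = acc.map (fun p => (p, d + 1)) ++ (bucket.filter (fun i => i != 0)).map
                    (fun i => (i, d + 1)) := by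
              rw [mind_bucket_eq, List.map_append, hbdef]
            have hUle : (bucket.filter (fun i => i != 0)).length
                + mindU colors (PySem.Set.add exp need) = mindU colors exp := by
              rw [mind_U_expand colors exp need hexp', hbdef]
              omega
            rcases h with ⟨r, hscan, heq⟩ | ⟨nxt, exp', visited', hscan, hrel'', heq, hle⟩
            · left
              refine ⟨r, ?_, ?_⟩
              · simp only [mindScan, if_neg hpn, hget, if_neg htg, hexp', Bool.not_false]
                simpa using hscan
              · simp only [List.length_cons, List.map_cons, List.cons_append]
                rw [show ps.length + 1 + fuelA = ps.length + fuelA + 1 by omega, hloop,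
                  hfold1, hfilt]
                rw [haccmap] at heq
                simpa [List.append_assoc] using heq
            · right
              refine ⟨nxt, exp', visited', ?_, hrel'', ?_, ?_⟩
              · simp only [mindScan, if_neg hpn, hget, if_neg htg, hexp', Bool.not_false]
                simpa using hscan
              · simp only [List.length_cons, List.map_cons, List.cons_append]
                rw [show ps.length + 1 + fuelA = ps.length + fuelA + 1 by omega, hloop,
                  hfold1, hfilt]
                rw [haccmap] at heq
                simpa [List.append_assoc] using heq
              · rw [mind_bucket_eq, ← hbdef, List.length_append] at hle
                omega

theorem mind_loopA_nil (n : Int) (colors : List Int) (target : Int) :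
    ∀ (fuel : Nat) (v : PySem.Set Int), mindLoopA n colors target fuel [] v = -1 := by
  intro fuel v
  cases fuel <;> rfl

theorem mind_loopB_nil (n : Int) (colors : List Int) (target : Int)
    (pos : PySem.Dict Int (List Int)) :
    ∀ (fuel : Nat) (exp : PySem.Set Int) (d : Int),
      mindLoopB n colors target pos fuel [] exp d = -1 := by
  intro fuel exp d
  cases fuel <;> rfl

-- the level loops agree given enough fuel on both sides
theorem mind_loops_sim (n : Int) (colors : List Int) (target : Int) :
    ∀ (fuelB : Nat) (frontier : List Int) (exp visited : PySem.Set Int) (d : Int) (fuelA : Nat),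
      (∀ i, PySem.Set.contains visited i = mindVis colors exp i) →
      frontier.length + mindU colors exp ≤ fuelA →
      mindU colors exp + 2 ≤ fuelB →
      mindLoopA n colors target fuelA (frontier.map (fun p => (p, d))) visited
        = mindLoopB n colors target (mindPos colors) fuelB frontier exp d := by
  intro fuelB
  induction fuelB with
  | zero => intro frontier exp visited d fuelA _ _ hB; omega
  | succ fuelB ih =>
    intro frontier exp visited d fuelA hrel hA hB
    cases frontier with
    | nil =>
      simp only [List.map_nil]
      rw [mind_loopA_nil]
      simp [mindLoopB]
    | cons p ps =>
      have hfa : (p :: ps).length + (fuelA - (p :: ps).length) = fuelA := by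
        have : (p :: ps).length ≤ fuelA := by omega
        omega
      obtain h := mind_scan_sim n colors target d (p :: ps) exp visited []
        (fuelA - (p :: ps).length) hrel
      rcases h with ⟨r, hscan, heq⟩ | ⟨nxt, exp', visited', hscan, hrel', heq, hle⟩
      · rw [show mindLoopB n colors target (mindPos colors) (fuelB + 1) (p :: ps) exp d
            = match mindScan n colors target (mindPos colors) d (p :: ps) exp [] with
              | .inl r => r
              | .inr (nxt, exp') =>
                  mindLoopB n colors target (mindPos colors) fuelB nxt exp' (d + 1) from rfl,
          hscan]
        rw [← heq, hfa]
        simp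
      · rw [show mindLoopB n colors target (mindPos colors) (fuelB + 1) (p :: ps) exp d
            = match mindScan n colors target (mindPos colors) d (p :: ps) exp [] with
              | .inl r => r
              | .inr (nxt, exp') =>
                  mindLoopB n colors target (mindPos colors) fuelB nxt exp' (d + 1) from rfl,
          hscan]
        have heq' : mindLoopA n colors target fuelA ((p :: ps).map (fun p => (p, d))) visited
            = mindLoopA n colors target (fuelA - (p :: ps).length)
                (nxt.map (fun p => (p, d + 1))) visited' := by
          rw [← hfa] at *
          simpa using heq
        rw [heq']
        cases nxt with
        | nil =>
          simp only [List.map_nil]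
          rw [mind_loopA_nil, mind_loopB_nil]
        | cons q qs =>
          apply ih
          · exact hrel'
          · simp only [List.length_nil] at hle
            omega
          · simp only [List.length_nil, List.length_cons] at hle
            omega

-- ===== VERDICT (by name: the statement is the Claim_ definition above) =====
theorem mind_spec : Claim_equal_mind := by
  unfold Claim_equal_mind
  intro n colors _ pre
  unfold Spec_mind
  obtain ⟨hne, -⟩ := pre
  obtain ⟨x, rest, rfl⟩ : ∃ x rest, colors = x :: rest := by
    cases colors with
    | nil => exact absurd rfl hne
    | cons a l => exact ⟨a, l, rfl⟩
  have h0 : PySem.List.pyGet? (x :: rest) (0 : Int) = some x :=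
    PySem.List.pyGet?_zero_cons x rest
  obtain ⟨t, hlast⟩ : ∃ t, PySem.List.pyGet? (x :: rest) (-1 : Int) = some t := by
    rw [PySem.List.pyGet?_neg_one]
    cases hgl : (x :: rest).getLast? with
    | none => simp at hgl
    | some t => exact ⟨t, rfl⟩
  unfold mind mind_alt
  rw [h0, hlast]
  have hrel : ∀ i, PySem.Set.contains (PySem.Set.ofList [0]) i
      = mindVis (x :: rest) PySem.Set.empty i := by
    intro i
    rw [mindVis]
    simp [PySem.Set.ofList, PySem.Set.empty, PySem.Set.add, PySem.Set.contains, intBeqDecide]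
  have hUle : mindU (x :: rest) PySem.Set.empty ≤ (x :: rest).length := by
    unfold mindU
    calc ((PySem.List.pyRange 0 ((x :: rest).length : Int) 1).filter _).length
        ≤ (PySem.List.pyRange 0 ((x :: rest).length : Int) 1).length :=
          List.length_filter_le _ _
      _ = (x :: rest).length := by
          rw [PySem.List.pyRange_zero_natCast]; simp
  have := mind_loops_sim n (x :: rest) t ((x :: rest).length + 2) [0] PySem.Set.empty
    (PySem.Set.ofList [0]) 0 ((x :: rest).length + 2) hrel
    (by simp at hUle ⊢; omega) (by simp at hUle ⊢; omega)
  simpa using this
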